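-- pv_equiv track=rewrite | github.com/981377660LMT/algorithm-study | 21_位运算/按位与/SOSDP/与运算为0的二元组.py | count
-- ===== SOURCE A (Python) =====
-- from math import ceil, log2
-- from typing import List
--
-- N = ceil(log2(1e5))
--
-- UPPER = 1 << N
--
-- def count(nums: List[int]) -> int:
--     """与运算为0的二元组个数
--
--     n<=1e5,nums[i]<=1e5
--
--     sosdp 计算每个状态的高维前缀和即可
--     对于a[i]，与他匹配的a[j]一定都贡献进a[i]的补集，那么答案就是sum(f[补ai])
--     """
--     sosdp = [0] * UPPER
--     for num in nums:
--         sosdp[num] += 1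
--
--     for i in range(N):
--         for state in range(UPPER):
--             if (state >> i) & 1:
--                 sosdp[state] += sosdp[state ^ (1 << i)]
--
--     res = 0
--     for num in nums:
--         comp = (UPPER - 1) ^ num
--         res += sosdp[comp]
--     return res
-- ===== SOURCE B (Python) =====
-- from typing import List
--
--
-- def count(nums: List[int]) -> int:
--     """Direct count of ordered pairs (x, y) with x & y == 0."""
--     res = 0
--     for x in nums:
--         for y in nums:
--             if x & y == 0:
--                 res += 1
--     return res
-- ===== Notes on version B (the rewrite author's own statement) =====
-- stated objective: simpler
-- what changed: Replaced the 2^17-entry SOS (subset-sum) DP table with complement lookups by a direct nested loop over all ordered element pairs counting x & y == 0.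
-- intended difference: On lists (all elements in [-2^17,2^17)) containing two negative elements x,y with (x+2^17)&(y+2^17)==0, A's negative-index wraparound counts the pair as AND-zero (A returns 1 on [-131072]) while B returns the true count of pairs with x&y==0 (0 there), which is intended since the AND of two negative ints is negative, never 0. — e.g. on count([-131072]): A returns 1, B returns 0
import Mathlib
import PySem

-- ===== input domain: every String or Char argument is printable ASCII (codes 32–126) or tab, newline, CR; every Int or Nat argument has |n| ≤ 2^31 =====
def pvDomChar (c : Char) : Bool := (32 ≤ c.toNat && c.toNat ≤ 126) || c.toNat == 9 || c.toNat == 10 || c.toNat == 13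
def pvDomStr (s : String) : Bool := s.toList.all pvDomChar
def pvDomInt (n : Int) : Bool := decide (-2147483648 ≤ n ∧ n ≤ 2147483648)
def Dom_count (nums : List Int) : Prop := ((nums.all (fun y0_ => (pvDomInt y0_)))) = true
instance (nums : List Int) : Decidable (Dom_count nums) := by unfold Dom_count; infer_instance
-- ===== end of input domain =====

-- B replaces the 2^17-entry SOS subset-sum table of A with a direct nested loop counting
-- ordered pairs with x & y == 0 (simpler, no table); return-value equivalence only, A mutates nothing.

-- ===== PORT A =====
-- Python list indexing sosdp[i]: exact for -len ≤ i < len (negative index wraps); A raises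
-- IndexError outside that range, which Pre_count excludes.
def pvIdx (n : Nat) (i : Int) : Nat := (if i < 0 then i + (n : Int) else i).toNat

def count (nums : List Int) : Int :=
  -- sosdp = [0] * UPPER  (N = 17, UPPER = 1 << 17 = 131072)
  let sosdp : Array Int := Array.replicate 131072 (0 : Int)
  -- for num in nums: sosdp[num] += 1
  let sosdp := nums.foldl (fun a num => a.modify (pvIdx 131072 num) (· + 1)) sosdp
  -- for i in range(N): for state in range(UPPER): if (state >> i) & 1: sosdp[state] += sosdp[state ^ (1 << i)]
  let sosdp := (List.range 17).foldl (fun a i =>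
    (List.range 131072).foldl (fun a state =>
      if (state >>> i) &&& 1 = 1 then
        let tmp := a.getD (state ^^^ (1 <<< i)) 0
        a.modify state (fun v => v + tmp)
      else a) a) sosdp
  -- res = 0; for num in nums: comp = (UPPER - 1) ^ num; res += sosdp[comp]
  nums.foldl (fun res num => res + sosdp.getD (pvIdx 131072 (Int.xor (131072 - 1) num)) 0) 0

-- ===== PORT B =====
def count_alt (nums : List Int) : Int :=
  nums.foldl (fun res x =>
    nums.foldl (fun res y => if Int.land x y = 0 then res + 1 else res) res) 0

-- ===== PRECONDITION & SPEC =====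
-- Pre_count: exactly the inputs where A returns (list indices in range); outside it A raises IndexError.
def Pre_count (nums : List Int) : Prop := ∀ x ∈ nums, -131072 ≤ x ∧ x < 131072
instance (nums : List Int) : Decidable (Pre_count nums) := by unfold Pre_count; infer_instance
def pvWitness_count : List Int := [0, 3, 131071, -1]

-- On lists (all elements in [-2^17,2^17)) containing two negative elements x,y with
-- (x+2^17)&(y+2^17)==0, A's negative-index wraparound counts the pair as AND-zero (A returns 1 on
-- [-131072]) while B returns the true count of pairs with x&y==0 (0 there), which is intended since
-- the AND of two negative ints is negative, never 0.
def D_count (nums : List Int) : Prop :=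
  ∃ x ∈ nums, ∃ y ∈ nums, x < 0 ∧ y < 0 ∧ Int.land (x + 131072) (y + 131072) = 0
instance (nums : List Int) : Decidable (D_count nums) := by unfold D_count; infer_instance

def Spec_count (nums : List Int) (out : Int) : Prop := ¬ D_count nums → out = count_alt nums
instance (nums : List Int) (out : Int) : Decidable (Spec_count nums out) := by unfold Spec_count; infer_instance

def pvDiffWitness_count : List Int := [-131072]
def pvDiffWitnessOut_count : Int × Int := (1, 0)

-- ===== CLAIM (what is proved, stated in full; the proofs are below) =====
def Claim_unchanged_count : Prop := ∀ (nums : List Int), Dom_count nums → Pre_count nums → Spec_count nums (count nums)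
def Claim_changed_count : Prop := Dom_count (pvDiffWitness_count) ∧ Pre_count (pvDiffWitness_count) ∧ D_count (pvDiffWitness_count) ∧ count (pvDiffWitness_count) = pvDiffWitnessOut_count.1 ∧ count_alt (pvDiffWitness_count) = pvDiffWitnessOut_count.2 ∧ pvDiffWitnessOut_count.1 ≠ pvDiffWitnessOut_count.2
def Claim_exact_count : Prop := ∀ (nums : List Int), Dom_count nums → Pre_count nums → D_count nums → count nums ≠ count_alt nums

-- ===== LEMMAS AND PROOFS =====

-- ---- bit-level facts ----
theorem pv_testBit_hi {p : Nat} (hp : p < 131072) {b : Nat} (hb : 17 ≤ b) : p.testBit b = false := by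
  exact Nat.testBit_lt_two_pow (lt_of_lt_of_le hp (by calc (131072:Nat) = 2 ^ 17 := by norm_num
    _ ≤ 2 ^ b := Nat.pow_le_pow_right (by norm_num) hb))

theorem pv_eq_iff_bits {p q : Nat} (hp : p < 131072) (hq : q < 131072) :
    p = q ↔ ∀ b, b < 17 → p.testBit b = q.testBit b := by
  constructor
  · intro h; subst h; intro b _; rfl
  · intro h
    apply Nat.eq_of_testBit_eq
    intro b
    by_cases hb : b < 17
    · exact h b hb
    · rw [pv_testBit_hi hp (by omega), pv_testBit_hi hq (by omega)]

theorem pv_land_zero {p : Nat} (q : Nat) (hp : p < 131072) :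
    p &&& q = 0 ↔ ∀ b, b < 17 → ¬(p.testBit b = true ∧ q.testBit b = true) := by
  constructor
  · intro h b _ ⟨h1, h2⟩
    have := Nat.testBit_land p q b
    rw [h, h1, h2, Nat.zero_testBit] at this
    simp at this
  · intro h
    apply Nat.eq_of_testBit_eq
    intro b
    rw [Nat.testBit_land, Nat.zero_testBit]
    by_cases hb : b < 17
    · have := h b hb
      cases h1 : p.testBit b <;> cases h2 : q.testBit b <;> simp_all
    · rw [pv_testBit_hi hp (by omega)]; rfl

theorem pv_ldiff_zero {p : Nat} (q : Nat) (hp : p < 131072) :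
    p.ldiff q = 0 ↔ ∀ b, b < 17 → ¬(p.testBit b = true ∧ q.testBit b = false) := by
  constructor
  · intro h b _ ⟨h1, h2⟩
    have := Nat.testBit_ldiff p q b
    rw [h, h1, h2, Nat.zero_testBit] at this
    simp at this
  · intro h
    apply Nat.eq_of_testBit_eq
    intro b
    rw [Nat.testBit_ldiff, Nat.zero_testBit]
    by_cases hb : b < 17
    · have := h b hb
      cases h1 : p.testBit b <;> cases h2 : q.testBit b <;> simp_all
    · rw [pv_testBit_hi hp (by omega)]; rfl

theorem pv_xor_ones : ∀ (n : Nat), ∀ m, m < 2 ^ n → m + ((2 ^ n - 1) ^^^ m) = 2 ^ n - 1 := by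
  intro n
  induction n with
  | zero =>
    intro m hm
    have : m = 0 := by omega
    subst this; rfl
  | succ n ih =>
    intro m hm
    have hpow : 2 ^ (n + 1) = 2 * 2 ^ n := by ring
    have hmod : (2 ^ (n + 1) - 1 + m) % 2 = (1 + m) % 2 := by
      have h1 : 1 ≤ 2 ^ n := Nat.one_le_two_pow
      omega
    have hX2 : ((2 ^ (n + 1) - 1) ^^^ m) % 2 = (1 + m) % 2 := by
      rw [Nat.xor_mod_two_eq, hmod]
    have hXd : ((2 ^ (n + 1) - 1) ^^^ m) / 2 = (2 ^ n - 1) ^^^ (m / 2) := by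
      have h1 : ((2 ^ (n + 1) - 1) ^^^ m) >>> 1 = (2 ^ (n + 1) - 1) >>> 1 ^^^ m >>> 1 :=
        Nat.shiftRight_xor_distrib
      have h2 : (2 ^ (n + 1) - 1) >>> 1 = (2 ^ (n + 1) - 1) / 2 := Nat.shiftRight_one _
      have h3 : m >>> 1 = m / 2 := Nat.shiftRight_one _
      have h4 : ((2 ^ (n + 1) - 1) ^^^ m) >>> 1 = ((2 ^ (n + 1) - 1) ^^^ m) / 2 := Nat.shiftRight_one _
      have h5 : (2 ^ (n + 1) - 1) / 2 = 2 ^ n - 1 := by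
        have h1 : 1 ≤ 2 ^ n := Nat.one_le_two_pow
        omega
      rw [← h4, h1, h2, h3, h5]
    have hq := ih (m / 2) (by omega)
    have hdm := Nat.div_add_mod ((2 ^ (n + 1) - 1) ^^^ m) 2
    have h1 : 1 ≤ 2 ^ n := Nat.one_le_two_pow
    omega

theorem pv_sub_xor {m : Nat} (hm : m ≤ 131071) : 131071 - m = 131071 ^^^ m := by
  have := pv_xor_ones 17 m (by norm_num; omega)
  norm_num at this
  omega

-- ---- pvIdx facts ----
theorem pv_idx_ofNat {n : Nat} (h : n < 131072) : pvIdx 131072 (Int.ofNat n) = n := by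
  unfold pvIdx
  simp only [Int.ofNat_eq_natCast]
  split_ifs with h1 <;> omega

theorem pv_idx_negSucc {m : Nat} (hm : m < 131072) : pvIdx 131072 (Int.negSucc m) = 131071 ^^^ m := by
  have h1 : pvIdx 131072 (Int.negSucc m) = 131071 - m := by
    unfold pvIdx
    rw [Int.negSucc_eq]
    split_ifs with h2 <;> omega
  rw [h1, pv_sub_xor (by omega)]

theorem pv_idx_lt {x : Int} (h1 : -131072 ≤ x) (h2 : x < 131072) : pvIdx 131072 x < 131072 := by
  unfold pvIdx
  split_ifs with h3 <;> omega

theorem pv_idx_comp {x : Int} (h1 : -131072 ≤ x) (h2 : x < 131072) :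
    pvIdx 131072 (Int.xor (131072 - 1) x) = 131071 ^^^ (pvIdx 131072 x) := by
  have hc : (131072 - 1 : Int) = Int.ofNat 131071 := by decide
  rw [hc]
  cases x with
  | ofNat n =>
    simp only [Int.ofNat_eq_natCast] at h1 h2
    have hn : n < 131072 := by omega
    have hxor : Int.xor (Int.ofNat 131071) (Int.ofNat n) = Int.ofNat (131071 ^^^ n) := rfl
    rw [hxor, pv_idx_ofNat (Nat.xor_lt_two_pow (x := 131071) (n := 17) (by norm_num) (by norm_num; omega)),
      pv_idx_ofNat hn]
  | negSucc m =>
    have hm : m < 131072 := by omega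
    have hxor : Int.xor (Int.ofNat 131071) (Int.negSucc m) = Int.negSucc (131071 ^^^ m) := rfl
    rw [hxor, pv_idx_negSucc (Nat.xor_lt_two_pow (x := 131071) (n := 17) (by norm_num) (by norm_num; omega)),
      pv_idx_negSucc hm, Nat.xor_xor_cancel_left]

theorem pv_neg_land_ne {x y : Int} (hx : x < 0) (hy : y < 0) : Int.land x y ≠ 0 := by
  cases x with
  | ofNat n => simp only [Int.ofNat_eq_natCast] at hx; omega
  | negSucc m =>
    cases y with
    | ofNat n => simp only [Int.ofNat_eq_natCast] at hy; omega
    | negSucc n =>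
      show Int.negSucc (m ||| n) ≠ 0
      simp [Int.negSucc_eq]
      omega

theorem pv_xor_lt {m : Nat} (hm : m < 131072) : 131071 ^^^ m < 131072 := by
  have : (131072 : Nat) = 2 ^ 17 := by norm_num
  rw [this] at hm ⊢
  exact Nat.xor_lt_two_pow (by norm_num) hm

theorem pv_pair_iff {x y : Int} (hx1 : -131072 ≤ x) (hx2 : x < 131072) (hy1 : -131072 ≤ y) (hy2 : y < 131072) :
    ((pvIdx 131072 x) &&& (pvIdx 131072 y) = 0) ↔
      (Int.land x y = 0 ∨ (x < 0 ∧ y < 0 ∧ Int.land (x + 131072) (y + 131072) = 0)) := by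
  have hbit : ∀ m b : Nat, m < 131072 → b < 17 → (131071 ^^^ m).testBit b = !m.testBit b := by
    intro m b _ hb
    rw [show (131071 : Nat) = 2 ^ 17 - 1 by norm_num, Nat.testBit_xor, Nat.testBit_two_pow_sub_one]
    simp [hb]
  cases x with
  | ofNat a =>
    simp only [Int.ofNat_eq_natCast] at hx1 hx2
    have ha : a < 131072 := by omega
    rw [pv_idx_ofNat ha]
    cases y with
    | ofNat b =>
      simp only [Int.ofNat_eq_natCast] at hy1 hy2
      have hb : b < 131072 := by omega
      rw [pv_idx_ofNat hb]
      have hland : Int.land (Int.ofNat a) (Int.ofNat b) = Int.ofNat (a &&& b) := rfl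
      constructor
      · intro h
        left
        rw [hland, h]
        rfl
      · rintro (h | ⟨h1, _, _⟩)
        · rw [hland] at h
          exact Int.ofNat_inj.mp h
        · simp only [Int.ofNat_eq_natCast] at h1
          omega
    | negSucc m =>
      have hm : m < 131072 := by
        rw [Int.negSucc_eq] at hy1
        omega
      rw [pv_idx_negSucc hm]
      have hland : Int.land (Int.ofNat a) (Int.negSucc m) = Int.ofNat (a.ldiff m) := rfl
      constructor
      · intro h
        left
        rw [hland]
        have : a.ldiff m = 0 := by
          rw [pv_ldiff_zero m ha]
          intro b hb ⟨h1, h2⟩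
          exact ((pv_land_zero (131071 ^^^ m) ha).mp h) b hb ⟨h1, by rw [hbit m b hm hb, h2]; rfl⟩
        rw [this]; rfl
      · rintro (h | ⟨h1, _, _⟩)
        · rw [hland] at h
          have hd : a.ldiff m = 0 := Int.ofNat_inj.mp h
          rw [pv_land_zero (131071 ^^^ m) ha]
          intro b hb ⟨h1, h2⟩
          rw [hbit m b hm hb] at h2
          exact ((pv_ldiff_zero m ha).mp hd) b hb ⟨h1, by simpa using h2⟩
        · simp only [Int.ofNat_eq_natCast] at h1
          omega
  | negSucc m =>
    have hm : m < 131072 := by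
      rw [Int.negSucc_eq] at hx1
      omega
    rw [pv_idx_negSucc hm]
    cases y with
    | ofNat b =>
      simp only [Int.ofNat_eq_natCast] at hy1 hy2
      have hb : b < 131072 := by omega
      rw [pv_idx_ofNat hb]
      have hland : Int.land (Int.negSucc m) (Int.ofNat b) = Int.ofNat (b.ldiff m) := rfl
      constructor
      · intro h
        left
        rw [hland]
        have : b.ldiff m = 0 := by
          rw [pv_ldiff_zero m hb]
          intro c hc ⟨h1, h2⟩
          exact ((pv_land_zero (q := b) (pv_xor_lt hm)).mp h) c hc
            ⟨by rw [hbit m c hm hc, h2]; rfl, h1⟩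
        rw [this]; rfl
      · rintro (h | ⟨_, h2, _⟩)
        · rw [hland] at h
          have hd : b.ldiff m = 0 := Int.ofNat_inj.mp h
          rw [pv_land_zero (q := b) (pv_xor_lt hm)]
          intro c hc ⟨h1, h2⟩
          rw [hbit m c hm hc] at h1
          exact ((pv_ldiff_zero m hb).mp hd) c hc ⟨h2, by simpa using h1⟩
        · simp only [Int.ofNat_eq_natCast] at h2
          omega
    | negSucc n =>
      have hn : n < 131072 := by
        rw [Int.negSucc_eq] at hy1
        omega
      rw [pv_idx_negSucc hn]
      have hxpos : (Int.negSucc m + 131072) = Int.ofNat (131071 - m) := by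
        rw [Int.negSucc_eq, Int.ofNat_eq_natCast, Nat.cast_sub (by omega)]
        push_cast
        ring
      have hypos : (Int.negSucc n + 131072) = Int.ofNat (131071 - n) := by
        rw [Int.negSucc_eq, Int.ofNat_eq_natCast, Nat.cast_sub (by omega)]
        push_cast
        ring
      constructor
      · intro h
        right
        refine ⟨by rw [Int.negSucc_eq]; omega, by rw [Int.negSucc_eq]; omega, ?_⟩
        rw [hxpos, hypos,
          show Int.land (Int.ofNat (131071 - m)) (Int.ofNat (131071 - n))
            = Int.ofNat ((131071 - m) &&& (131071 - n)) from rfl,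
          pv_sub_xor (by omega), pv_sub_xor (by omega), h]
        rfl
      · rintro (h | ⟨_, _, h3⟩)
        · exact absurd h (pv_neg_land_ne (by rw [Int.negSucc_eq]; omega) (by rw [Int.negSucc_eq]; omega))
        · rw [hxpos, hypos,
            show Int.land (Int.ofNat (131071 - m)) (Int.ofNat (131071 - n))
              = Int.ofNat ((131071 - m) &&& (131071 - n)) from rfl,
            pv_sub_xor (by omega), pv_sub_xor (by omega)] at h3
          exact Int.ofNat_inj.mp h3

-- ---- proof-side abbreviations ----
def pvCnt (nums : List Int) (m : Nat) : Int := (nums.countP (fun x => pvIdx 131072 x == m) : Int)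

def pvBitsub (j m k : Nat) : Bool :=
  (List.range 17).all (fun b => if b < j then (!m.testBit b || k.testBit b) else m.testBit b == k.testBit b)

def pvSum (nums : List Int) (j k : Nat) : Int :=
  ∑ m ∈ Finset.range 131072, if pvBitsub j m k then pvCnt nums m else 0

-- ---- counting phase ----
theorem pv_getD_modify (a : Array Int) (f : Int → Int) (i j : Nat) (hj : j < a.size) :
    (a.modify i f).getD j 0 = if i = j then f (a.getD j 0) else a.getD j 0 := by
  simp [Array.getD, Array.size_modify, hj, Array.getElem_modify]

theorem pv_count_phase (nums : List Int) (a : Array Int) (ha : a.size = 131072) :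
    (nums.foldl (fun a num => a.modify (pvIdx 131072 num) (· + 1)) a).size = 131072 ∧
    ∀ k, k < 131072 →
      (nums.foldl (fun a num => a.modify (pvIdx 131072 num) (· + 1)) a).getD k 0
        = a.getD k 0 + pvCnt nums k := by
  induction nums generalizing a with
  | nil => exact ⟨ha, by simp [pvCnt]⟩
  | cons x t ih =>
    have ha' : (a.modify (pvIdx 131072 x) (· + 1)).size = 131072 := by
      simp [Array.size_modify, ha]
    obtain ⟨hs, hv⟩ := ih (a.modify (pvIdx 131072 x) (· + 1)) ha'
    simp only [List.foldl_cons]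
    refine ⟨hs, ?_⟩
    intro k hk
    rw [hv k hk, pv_getD_modify a _ _ k (by omega)]
    simp only [pvCnt, List.countP_cons]
    push_cast
    by_cases hix : pvIdx 131072 x = k
    · simp [hix]
      ring
    · simp [hix]

-- ---- one SOS pass ----
theorem pv_cond_iff {s i : Nat} : ((s >>> i) &&& 1 = 1) ↔ s.testBit i = true := by
  rw [Nat.and_one_is_mod]
  constructor <;> intro h
  · rw [← Nat.decide_shiftRight_mod_two_eq_one]
    simp [h]
  · have := Nat.decide_shiftRight_mod_two_eq_one (x := s) (i := i)
    rw [h] at this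
    exact of_decide_eq_true this

theorem pv_xor_bit_lt {k i : Nat} (hk : k < 131072) (hi : i < 17) : k ^^^ (1 <<< i) < 131072 := by
  have h1 : (131072 : Nat) = 2 ^ 17 := by norm_num
  rw [Nat.one_shiftLeft, h1] at *
  exact Nat.xor_lt_two_pow hk (Nat.pow_lt_pow_right (by norm_num) hi)

theorem pv_testBit_xor_bit (k i : Nat) : (k ^^^ (1 <<< i)).testBit i = !k.testBit i := by
  rw [Nat.testBit_xor, Nat.one_shiftLeft, Nat.testBit_two_pow]
  simp

theorem pv_pass (i : Nat) (hi : i < 17) (t : Nat) (ht : t ≤ 131072) (a : Array Int) (ha : a.size = 131072) :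
    ((List.range t).foldl (fun a state =>
      if (state >>> i) &&& 1 = 1 then
        a.modify state (fun v => v + a.getD (state ^^^ (1 <<< i)) 0)
      else a) a).size = 131072 ∧
    ∀ k, k < 131072 →
      ((List.range t).foldl (fun a state =>
        if (state >>> i) &&& 1 = 1 then
          a.modify state (fun v => v + a.getD (state ^^^ (1 <<< i)) 0)
        else a) a).getD k 0
        = if k < t ∧ k.testBit i then a.getD k 0 + a.getD (k ^^^ (1 <<< i)) 0 else a.getD k 0 := by
  induction t with
  | zero =>
    refine ⟨by simpa using ha, ?_⟩
    intro k hk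
    simp
  | succ t iht =>
    obtain ⟨hbs, hbv⟩ := iht (by omega)
    simp only [List.range_succ, List.foldl_append, List.foldl_cons, List.foldl_nil]
    by_cases hbit : t.testBit i = true
    · rw [if_pos (pv_cond_iff.mpr hbit)]
      refine ⟨by simpa [Array.size_modify] using hbs, ?_⟩
      intro k hk
      rw [pv_getD_modify _ _ t k (by omega)]
      by_cases hkt : t = k
      · subst hkt
        rw [if_pos rfl, hbv t (by omega), hbv (t ^^^ (1 <<< i)) (pv_xor_bit_lt (by omega) hi),
          if_neg (by omega), if_neg (by rw [pv_testBit_xor_bit, hbit]; simp),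
          if_pos ⟨by omega, hbit⟩]
      · rw [if_neg hkt, hbv k hk]
        by_cases hklt : k < t
        · have hc : (k < t + 1 ∧ k.testBit i = true) ↔ (k < t ∧ k.testBit i = true) := by
            constructor <;> rintro ⟨h1, h2⟩ <;> exact ⟨by omega, h2⟩
          rw [if_congr hc rfl rfl]
        · rw [if_neg (by omega), if_neg (by rintro ⟨h1, _⟩; omega)]
    · rw [if_neg (fun hc => hbit (pv_cond_iff.mp hc))]
      refine ⟨hbs, ?_⟩
      intro k hk
      rw [hbv k hk]
      by_cases hklt : k < t
      · have hc : (k < t + 1 ∧ k.testBit i = true) ↔ (k < t ∧ k.testBit i = true) := by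
          constructor <;> rintro ⟨h1, h2⟩ <;> exact ⟨by omega, h2⟩
        rw [if_congr hc rfl rfl]
      · by_cases hkt : k = t
        · subst hkt
          rw [if_neg (by omega), if_neg (by rintro ⟨_, h2⟩; exact hbit h2)]
        · rw [if_neg (by omega), if_neg (by rintro ⟨h1, _⟩; omega)]

-- ---- pvSum recurrences ----
theorem pv_testBit_xor_ne (k j b : Nat) (h : j ≠ b) : (k ^^^ (1 <<< j)).testBit b = k.testBit b := by
  rw [Nat.testBit_xor, Nat.one_shiftLeft, Nat.testBit_two_pow]
  simp [h]

theorem pv_bitsub_iff {j m k : Nat} : pvBitsub j m k = true ↔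
    ∀ b, b < 17 → ((b < j → (m.testBit b = true → k.testBit b = true)) ∧
      (¬ b < j → m.testBit b = k.testBit b)) := by
  simp only [pvBitsub, List.all_eq_true, List.mem_range]
  constructor
  · intro h b hb
    have hthis := h b hb
    constructor
    · intro hbj hm
      rw [if_pos hbj, hm] at hthis
      simpa using hthis
    · intro hbj
      rw [if_neg hbj] at hthis
      exact eq_of_beq hthis
  · intro h b hb
    obtain ⟨h1, h2⟩ := h b hb
    by_cases hbj : b < j
    · rw [if_pos hbj]
      cases hm : m.testBit b
      · simp
      · simp [h1 hbj hm]
    · rw [if_neg hbj, h2 hbj]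
      simp

theorem pv_sum_zero (nums : List Int) {k : Nat} (hk : k < 131072) : pvSum nums 0 k = pvCnt nums k := by
  unfold pvSum
  have hterm : ∀ m ∈ Finset.range 131072,
      (if pvBitsub 0 m k then pvCnt nums m else 0) = if m = k then pvCnt nums m else 0 := by
    intro m hm
    simp only [Finset.mem_range] at hm
    refine if_congr ?_ rfl rfl
    rw [pv_bitsub_iff]
    constructor
    · intro h
      exact (pv_eq_iff_bits hm hk).mpr (fun b hb => (h b hb).2 (by omega))
    · intro h
      subst h
      exact fun b hb => ⟨fun _ h => h, fun _ => rfl⟩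
  rw [Finset.sum_congr rfl hterm]
  rw [Finset.sum_ite_eq' (Finset.range 131072) k (fun m => pvCnt nums m)]
  rw [if_pos (Finset.mem_range.mpr hk)]

theorem pv_sum_step (nums : List Int) {j k : Nat} (hj : j < 17) :
    pvSum nums (j + 1) k
      = if k.testBit j then pvSum nums j k + pvSum nums j (k ^^^ (1 <<< j)) else pvSum nums j k := by
  by_cases hbit : k.testBit j = true
  · rw [if_pos hbit]
    unfold pvSum
    rw [← Finset.sum_add_distrib]
    apply Finset.sum_congr rfl
    intro m _
    have hPQ : ¬(pvBitsub j m k = true ∧ pvBitsub j m (k ^^^ (1 <<< j)) = true) := by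
      rintro ⟨hP, hQ⟩
      have h1 := ((pv_bitsub_iff.mp hP) j hj).2 (by omega)
      have h2 := ((pv_bitsub_iff.mp hQ) j hj).2 (by omega)
      rw [pv_testBit_xor_bit, hbit] at h2
      rw [h1] at h2
      simp [hbit] at h2
    have hR : pvBitsub (j + 1) m k = true ↔
        (pvBitsub j m k = true ∨ pvBitsub j m (k ^^^ (1 <<< j)) = true) := by
      constructor
      · intro h
        have hb := pv_bitsub_iff.mp h
        cases hm : m.testBit j
        · right
          rw [pv_bitsub_iff]
          intro b hbb
          refine ⟨fun hbj hmb => ?_, fun hbj => ?_⟩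
          · rw [pv_testBit_xor_ne k j b (by omega)]
            exact (hb b hbb).1 (by omega) hmb
          · by_cases hbj2 : b = j
            · subst hbj2
              rw [pv_testBit_xor_bit, hbit, hm]
              rfl
            · rw [pv_testBit_xor_ne k j b (by omega)]
              exact (hb b hbb).2 (by omega)
        · left
          rw [pv_bitsub_iff]
          intro b hbb
          refine ⟨fun hbj hmb => (hb b hbb).1 (by omega) hmb, fun hbj => ?_⟩
          by_cases hbj2 : b = j
          · subst hbj2
            rw [hm, hbit]
          · exact (hb b hbb).2 (by omega)
      · rintro (h | h)
        · rw [pv_bitsub_iff]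
          intro b hbb
          obtain ⟨h1, h2⟩ := (pv_bitsub_iff.mp h) b hbb
          refine ⟨fun hbj hmb => ?_, fun hbj => h2 (by omega)⟩
          by_cases hbj2 : b = j
          · subst hbj2
            exact hbit
          · exact h1 (by omega) hmb
        · rw [pv_bitsub_iff]
          intro b hbb
          obtain ⟨h1, h2⟩ := (pv_bitsub_iff.mp h) b hbb
          refine ⟨fun hbj hmb => ?_, fun hbj => ?_⟩
          · by_cases hbj2 : b = j
            · subst hbj2
              have hzz := h2 (by omega)
              rw [pv_testBit_xor_bit, hbit, hmb] at hzz
              simp at hzz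
            · have hzz := h1 (by omega) hmb
              rwa [pv_testBit_xor_ne k j b (by omega)] at hzz
          · have hzz := h2 (by omega)
            rwa [pv_testBit_xor_ne k j b (by omega)] at hzz
    by_cases hP : pvBitsub j m k = true
    · have hQ : ¬ pvBitsub j m (k ^^^ (1 <<< j)) = true := fun hq => hPQ ⟨hP, hq⟩
      rw [if_pos (hR.mpr (Or.inl hP)), if_pos hP, if_neg hQ, add_zero]
    · by_cases hQ : pvBitsub j m (k ^^^ (1 <<< j)) = true
      · rw [if_pos (hR.mpr (Or.inr hQ)), if_neg hP, if_pos hQ, zero_add]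
      · rw [if_neg (fun hr => (hR.mp hr).elim hP hQ), if_neg hP, if_neg hQ, add_zero]
  · rw [if_neg hbit]
    unfold pvSum
    apply Finset.sum_congr rfl
    intro m _
    refine if_congr ?_ rfl rfl
    rw [pv_bitsub_iff, pv_bitsub_iff]
    have hbit' : k.testBit j = false := by simpa using hbit
    constructor
    · intro h b hbb
      obtain ⟨h1, h2⟩ := h b hbb
      refine ⟨fun hbj hmb => h1 (by omega) hmb, fun hbj => ?_⟩
      by_cases hbj2 : b = j
      · subst hbj2
        cases hm : m.testBit b
        · simp [hbit']
        · exact absurd (h1 (by omega) hm) (by simp [hbit'])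
      · exact h2 (by omega)
    · intro h b hbb
      obtain ⟨h1, h2⟩ := h b hbb
      refine ⟨fun hbj hmb => ?_, fun hbj => h2 (by omega)⟩
      by_cases hbj2 : b = j
      · subst hbj2
        rw [h2 (by omega), hbit'] at hmb
        exact absurd hmb (by simp)
      · exact h1 (by omega) hmb

-- ---- all passes ----
theorem pv_all_passes (nums : List Int) (j : Nat) (hj : j ≤ 17) (a : Array Int) (ha : a.size = 131072)
    (hval : ∀ k, k < 131072 → a.getD k 0 = pvCnt nums k) :
    ((List.range j).foldl (fun a i =>
      (List.range 131072).foldl (fun a state =>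
        if (state >>> i) &&& 1 = 1 then
          a.modify state (fun v => v + a.getD (state ^^^ (1 <<< i)) 0)
        else a) a) a).size = 131072 ∧
    ∀ k, k < 131072 →
      ((List.range j).foldl (fun a i =>
        (List.range 131072).foldl (fun a state =>
          if (state >>> i) &&& 1 = 1 then
            a.modify state (fun v => v + a.getD (state ^^^ (1 <<< i)) 0)
          else a) a) a).getD k 0 = pvSum nums j k := by
  induction j with
  | zero =>
    simp only [List.range_zero, List.foldl_nil]
    refine ⟨ha, fun k hk => ?_⟩
    rw [hval k hk, pv_sum_zero nums hk]
  | succ j ihj =>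
    obtain ⟨hs, hv⟩ := ihj (by omega)
    rw [show List.range (j + 1) = List.range j ++ [j] from List.range_succ,
      List.foldl_append, List.foldl_cons, List.foldl_nil]
    obtain ⟨hps, hpv⟩ := pv_pass j (by omega) 131072 (le_refl _) _ hs
    refine ⟨hps, fun k hk => ?_⟩
    have hcond : (k < 131072 ∧ k.testBit j = true) ↔ (k.testBit j = true) :=
      ⟨fun ⟨_, h⟩ => h, fun h => ⟨hk, h⟩⟩
    rw [hpv k hk, if_congr hcond rfl rfl, hv k hk,
      hv (k ^^^ (1 <<< j)) (pv_xor_bit_lt hk (by omega)), pv_sum_step nums (by omega)]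

-- ---- collapsing the final sum ----
theorem pv_sum_cnt (nums : List Int) (hpre : ∀ y ∈ nums, pvIdx 131072 y < 131072) (p : Nat) :
    (∑ m ∈ Finset.range 131072, if m &&& p = 0 then pvCnt nums m else 0)
      = (nums.countP (fun y => decide (p &&& pvIdx 131072 y = 0)) : Int) := by
  induction nums with
  | nil => simp [pvCnt]
  | cons y t ih =>
    have hy : pvIdx 131072 y < 131072 := hpre y List.mem_cons_self
    have hpre' : ∀ z ∈ t, pvIdx 131072 z < 131072 := fun z hz => hpre z (List.mem_cons_of_mem _ hz)
    have hsplit : ∀ m ∈ Finset.range 131072,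
        (if m &&& p = 0 then pvCnt (y :: t) m else 0)
          = (if m = pvIdx 131072 y then (if m &&& p = 0 then (1 : Int) else 0) else 0)
            + (if m &&& p = 0 then pvCnt t m else 0) := by
      intro m _
      have hc : pvCnt (y :: t) m = (if pvIdx 131072 y = m then (1 : Int) else 0) + pvCnt t m := by
        simp only [pvCnt, List.countP_cons]
        push_cast
        by_cases h2 : pvIdx 131072 y = m
        · simp [h2]
          ring
        · simp [h2]
      rw [hc]
      by_cases h1 : m &&& p = 0
      · rw [if_pos h1, if_pos h1, if_pos h1]
        by_cases h2 : pvIdx 131072 y = m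
        · rw [if_pos h2, if_pos h2.symm]
        · rw [if_neg h2, if_neg (fun h => h2 h.symm), zero_add]
      · rw [if_neg h1, if_neg h1, if_neg h1, add_zero]
        split_ifs <;> rfl
    rw [Finset.sum_congr rfl hsplit, Finset.sum_add_distrib, ih hpre',
      Finset.sum_ite_eq' (Finset.range 131072) (pvIdx 131072 y)
        (fun m => if m &&& p = 0 then (1 : Int) else 0),
      if_pos (Finset.mem_range.mpr hy), List.countP_cons]
    have hcond : (decide (p &&& pvIdx 131072 y = 0)) = decide (pvIdx 131072 y &&& p = 0) := by
      rw [Nat.land_comm]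
    rw [hcond]
    by_cases h2 : pvIdx 131072 y &&& p = 0
    · simp only [h2, decide_true, if_pos]
      push_cast
      ring
    · simp only [h2, decide_false, if_false]
      push_cast
      ring

-- ---- main characterization of A ----
theorem pv_sum_17 (nums : List Int) (hpre : Pre_count nums) {x : Int} (hx1 : -131072 ≤ x) (hx2 : x < 131072) :
    pvSum nums 17 (131071 ^^^ pvIdx 131072 x)
      = (nums.countP (fun y => decide ((pvIdx 131072 x) &&& (pvIdx 131072 y) = 0)) : Int) := by
  have hp : pvIdx 131072 x < 131072 := pv_idx_lt hx1 hx2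
  have hpre' : ∀ y ∈ nums, pvIdx 131072 y < 131072 :=
    fun y hy => pv_idx_lt (hpre y hy).1 (hpre y hy).2
  have hKbit : ∀ b, b < 17 → (131071 ^^^ pvIdx 131072 x).testBit b = !(pvIdx 131072 x).testBit b := by
    intro b hb
    rw [show (131071 : Nat) = 2 ^ 17 - 1 by norm_num, Nat.testBit_xor, Nat.testBit_two_pow_sub_one]
    simp [hb]
  have hterm : ∀ m ∈ Finset.range 131072,
      (if pvBitsub 17 m (131071 ^^^ pvIdx 131072 x) then pvCnt nums m else 0)
        = if m &&& pvIdx 131072 x = 0 then pvCnt nums m else 0 := by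
    intro m hm
    simp only [Finset.mem_range] at hm
    refine if_congr ?_ rfl rfl
    rw [pv_bitsub_iff, pv_land_zero (pvIdx 131072 x) hm]
    constructor
    · intro h b hb ⟨h1, h2⟩
      have hzz := (h b hb).1 hb h1
      rw [hKbit b hb, h2] at hzz
      simp at hzz
    · intro h b hb
      refine ⟨fun _ hmb => ?_, fun hb17 => absurd hb hb17⟩
      rw [hKbit b hb]
      cases hx : (pvIdx 131072 x).testBit b
      · rfl
      · exact absurd ⟨hmb, hx⟩ (h b hb)
  unfold pvSum
  rw [Finset.sum_congr rfl hterm, pv_sum_cnt nums hpre' (pvIdx 131072 x)]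

theorem pv_count_eq_pairs (nums : List Int) (hpre : Pre_count nums) :
    count nums = (nums.map (fun x =>
      (nums.countP (fun y => decide ((pvIdx 131072 x) &&& (pvIdx 131072 y) = 0)) : Int))).sum := by
  unfold count
  obtain ⟨h1s, h1v⟩ := pv_count_phase nums (Array.replicate 131072 0) (by simp)
  have hval : ∀ k, k < 131072 →
      (nums.foldl (fun a num => a.modify (pvIdx 131072 num) (· + 1)) (Array.replicate 131072 0)).getD k 0
        = pvCnt nums k := by
    intro k hk
    rw [h1v k hk]
    simp [Array.getD, hk]
  obtain ⟨h2s, h2v⟩ := pv_all_passes nums 17 (le_refl 17) _ h1s hval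
  rw [PySem.List.foldl_add, zero_add]
  refine congrArg List.sum (List.map_congr_left ?_)
  intro num hnum
  obtain ⟨hn1, hn2⟩ := hpre num hnum
  rw [pv_idx_comp hn1 hn2, h2v _ (pv_xor_lt (pv_idx_lt hn1 hn2)),
    pv_sum_17 nums hpre hn1 hn2]

-- ---- B as a sum ----
theorem pv_alt_eq_pairs (nums : List Int) :
    count_alt nums = (nums.map (fun x => (nums.countP (fun y => decide (Int.land x y = 0)) : Int))).sum := by
  unfold count_alt
  have hinner : ∀ (x : Int) (res : Int),
      nums.foldl (fun res y => if Int.land x y = 0 then res + 1 else res) res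
        = res + (nums.countP (fun y => decide (Int.land x y = 0)) : Int) := by
    intro x res
    exact PySem.List.foldl_ite_add_one (fun y => Int.land x y = 0) nums res
  calc nums.foldl (fun res x =>
        nums.foldl (fun res y => if Int.land x y = 0 then res + 1 else res) res) 0
      = nums.foldl (fun res x =>
          res + (nums.countP (fun y => decide (Int.land x y = 0)) : Int)) 0 := by
        have hfun : (fun (res x : Int) =>
            nums.foldl (fun res y => if Int.land x y = 0 then res + 1 else res) res)
              = (fun (res x : Int) =>
                res + (nums.countP (fun y => decide (Int.land x y = 0)) : Int)) := by
          funext res x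
          exact hinner x res
        rw [hfun]
    _ = (nums.map (fun x => (nums.countP (fun y => decide (Int.land x y = 0)) : Int))).sum := by
        rw [PySem.List.foldl_add, zero_add]

def pvE (nums : List Int) : Int :=
  (nums.map (fun x =>
    (nums.countP (fun y => decide (x < 0 ∧ y < 0 ∧ Int.land (x + 131072) (y + 131072) = 0)) : Int))).sum

theorem pv_countP_split (x : Int) (hx1 : -131072 ≤ x) (hx2 : x < 131072) (l : List Int)
    (hl : ∀ y ∈ l, -131072 ≤ y ∧ y < 131072) :
    l.countP (fun y => decide (pvIdx 131072 x &&& pvIdx 131072 y = 0))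
      = l.countP (fun y => decide (Int.land x y = 0))
        + l.countP (fun y => decide (x < 0 ∧ y < 0 ∧ Int.land (x + 131072) (y + 131072) = 0)) := by
  induction l with
  | nil => simp
  | cons y t ih =>
    obtain ⟨hy1, hy2⟩ := hl y List.mem_cons_self
    have ht : ∀ z ∈ t, -131072 ≤ z ∧ z < 131072 := fun z hz => hl z (List.mem_cons_of_mem _ hz)
    simp only [List.countP_cons]
    rw [ih ht]
    by_cases hA : Int.land x y = 0
    · have hB : ¬(x < 0 ∧ y < 0 ∧ Int.land (x + 131072) (y + 131072) = 0) := by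
        rintro ⟨hx0, hy0, _⟩
        exact pv_neg_land_ne hx0 hy0 hA
      have hL : pvIdx 131072 x &&& pvIdx 131072 y = 0 :=
        (pv_pair_iff hx1 hx2 hy1 hy2).mpr (Or.inl hA)
      simp [hA, hB, hL]
      omega
    · by_cases hB : x < 0 ∧ y < 0 ∧ Int.land (x + 131072) (y + 131072) = 0
      · have hL : pvIdx 131072 x &&& pvIdx 131072 y = 0 :=
          (pv_pair_iff hx1 hx2 hy1 hy2).mpr (Or.inr hB)
        simp [hA, hB, hL]
        omega
      · have hL : ¬ pvIdx 131072 x &&& pvIdx 131072 y = 0 :=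
          fun h => ((pv_pair_iff hx1 hx2 hy1 hy2).mp h).elim hA hB
        simp [hA, hB, hL]

theorem pv_count_split (nums : List Int) (hpre : Pre_count nums) :
    count nums = count_alt nums + pvE nums := by
  rw [pv_count_eq_pairs nums hpre, pv_alt_eq_pairs nums]
  unfold pvE
  rw [← PySem.List.sum_map_add_int]
  refine congrArg List.sum (List.map_congr_left ?_)
  intro x hx
  obtain ⟨hx1, hx2⟩ := hpre x hx
  rw [pv_countP_split x hx1 hx2 nums hpre]
  push_cast
  ring

theorem pv_E_zero (nums : List Int) (h : ¬ D_count nums) : pvE nums = 0 := by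
  unfold pvE
  have hz : ∀ x ∈ nums,
      ((nums.countP (fun y => decide (x < 0 ∧ y < 0 ∧ Int.land (x + 131072) (y + 131072) = 0)) : Int)) = (fun _ : Int => (0 : Int)) x := by
    intro x hx
    have : nums.countP (fun y => decide (x < 0 ∧ y < 0 ∧ Int.land (x + 131072) (y + 131072) = 0)) = 0 := by
      rw [List.countP_eq_zero]
      intro y hy hcond
      rw [decide_eq_true_eq] at hcond
      exact h ⟨x, hx, y, hy, hcond⟩
    rw [this]
    rfl
  rw [List.map_congr_left hz]
  simp

theorem pv_E_pos (nums : List Int) (h : D_count nums) : 1 ≤ pvE nums := by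
  obtain ⟨x, hx, y, hy, hcond⟩ := h
  unfold pvE
  have hterm : (1 : Int) ≤
      (nums.countP (fun z => decide (x < 0 ∧ z < 0 ∧ Int.land (x + 131072) (z + 131072) = 0)) : Int) := by
    have : 0 < nums.countP (fun z => decide (x < 0 ∧ z < 0 ∧ Int.land (x + 131072) (z + 131072) = 0)) := by
      rw [List.countP_pos_iff]
      exact ⟨y, hy, by rw [decide_eq_true_eq]; exact hcond⟩
    omega
  have hmem : ((nums.countP (fun z => decide (x < 0 ∧ z < 0 ∧ Int.land (x + 131072) (z + 131072) = 0)) : Int)) ∈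
      nums.map (fun x => (nums.countP (fun y => decide (x < 0 ∧ y < 0 ∧ Int.land (x + 131072) (y + 131072) = 0)) : Int)) :=
    List.mem_map_of_mem hx
  have hnn : ∀ v ∈ nums.map (fun x => (nums.countP (fun y => decide (x < 0 ∧ y < 0 ∧ Int.land (x + 131072) (y + 131072) = 0)) : Int)), 0 ≤ v := by
    intro v hv
    obtain ⟨z, _, rfl⟩ := List.mem_map.mp hv
    positivity
  calc (1 : Int) ≤ _ := hterm
    _ ≤ _ := List.single_le_sum hnn _ hmem

-- ===== VERDICT (by name: the statement is the Claim_ definition above) =====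
theorem count_spec : Claim_unchanged_count := by
  intro nums _ hpre hD
  rw [pv_count_split nums hpre, pv_E_zero nums hD, add_zero]

theorem count_changed : Claim_changed_count := by
  unfold Claim_changed_count
  refine ⟨by decide, by decide, by decide, ?_, by decide, by decide⟩
  have h := pv_count_eq_pairs pvDiffWitness_count (by decide)
  rw [h]; decide

theorem count_tight : Claim_exact_count := by
  intro nums _ hpre hD
  have h := pv_count_split nums hpre
  have h2 := pv_E_pos nums hD
  omega
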